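-- pv_equiv track=rewrite | github.com/YinuoQ/AINegativelyImpactsTeamPerformance | compare_speech_event.py | get_number_of_speech_events
-- ===== SOURCE A (Python) =====
-- def get_number_of_speech_events(input_arr):
--     """
--     Count the number of continuous chunks of speech events in an array.
--
--     This function identifies sequences of consecutive speech activity periods
--     and counts how many such sequences exist in the recording.
--
--     Parameters:
--         input_arr (array-like): Array of speech activity indicators (0=no speech, 1=speech)
--
--     Returns:
--         int: Number of continuous speech event chunks
--
--     Example:
--         [0, 1, 1, 0, 1, 0, 1, 1, 1] -> 3 chunks: [1,1], [1], [1,1,1]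
--     """
--     continuous_chunks = 0
--     in_chunk = False
--
--     # Handle special case where input_arr is nested
--     if len(input_arr) == 2:
--         input_arr = input_arr[0]
--
--     # Iterate through the array to identify and count continuous speech chunks
--     for value in input_arr:
--         # Start of a new chunk: speech detected when not already in a chunk
--         if value != 0 and not in_chunk:
--             continuous_chunks += 1
--             in_chunk = True
--         # End of current chunk: no speech detected
--         elif value == 0:
--             in_chunk = False
--
--     return continuous_chunks
-- ===== SOURCE B (Python) =====
-- def get_number_of_speech_events(input_arr):
--     # Count rising edges: positions where speech starts (nonzero preceded by zero).
--     return sum(1 for prev, cur in zip([0] + list(input_arr), input_arr)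
--                if cur != 0 and prev == 0)
-- ===== Notes on version B (the rewrite author's own statement) =====
-- stated objective: simpler
-- what changed: Replaces the in_chunk state-machine loop and the nested-input guard with a one-line rising-edge count over the array zipped with its shifted self.
import Mathlib
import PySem

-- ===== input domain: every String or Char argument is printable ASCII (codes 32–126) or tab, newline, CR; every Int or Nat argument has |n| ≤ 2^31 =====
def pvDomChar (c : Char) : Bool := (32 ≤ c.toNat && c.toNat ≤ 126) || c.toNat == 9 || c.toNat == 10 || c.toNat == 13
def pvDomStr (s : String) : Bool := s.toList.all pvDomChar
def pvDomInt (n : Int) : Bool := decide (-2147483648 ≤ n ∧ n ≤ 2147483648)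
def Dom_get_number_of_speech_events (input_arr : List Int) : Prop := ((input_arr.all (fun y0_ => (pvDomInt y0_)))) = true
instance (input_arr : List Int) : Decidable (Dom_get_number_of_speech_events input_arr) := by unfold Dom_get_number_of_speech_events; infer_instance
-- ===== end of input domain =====

-- B replaces A's in_chunk state-machine loop with a rising-edge count (zip with shifted self): simpler.
-- A raises TypeError on any two-element list (its nested-input guard iterates over an int); Pre_ excludes those, B returns the count there.


-- ===== PORT A =====
-- the for-loop over input_arr, with state (continuous_chunks, in_chunk)
def pvLoopA : List Int → Int → Bool → Int
  | [], c, _ => c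
  | v :: rest, c, inC =>
    if v ≠ 0 ∧ inC = false then pvLoopA rest (c + 1) true
    else if v = 0 then pvLoopA rest c false
    else pvLoopA rest c inC

def get_number_of_speech_events (input_arr : List Int) : Int :=
  -- Python: if len(input_arr) == 2: input_arr = input_arr[0] — then iterating over that int
  -- raises TypeError; excluded by Pre_, value here arbitrary.
  if input_arr.length = 2 then 0
  else pvLoopA input_arr 0 false

-- ===== PORT B =====
def get_number_of_speech_events_alt (input_arr : List Int) : Int :=
  Int.ofNat (((0 :: input_arr).zip input_arr).countP (fun p => decide (p.2 ≠ 0 ∧ p.1 = 0)))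

-- ===== PRECONDITION & SPEC =====
-- Pre_ excludes exactly the two-element lists, on which A raises TypeError (iterates over an int).
def Pre_get_number_of_speech_events (input_arr : List Int) : Prop := input_arr.length ≠ 2
instance (input_arr : List Int) : Decidable (Pre_get_number_of_speech_events input_arr) := by unfold Pre_get_number_of_speech_events; infer_instance
def pvWitness_get_number_of_speech_events : List Int := ([0, 1, 1, 0, 1])

def Spec_get_number_of_speech_events (input_arr : List Int) (out : Int) : Prop := out = get_number_of_speech_events_alt input_arr
instance (input_arr : List Int) (out : Int) : Decidable (Spec_get_number_of_speech_events input_arr out) := by unfold Spec_get_number_of_speech_events; infer_instance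

-- ===== CLAIM (what is proved, stated in full; the proofs are below) =====
def Claim_equal_get_number_of_speech_events : Prop := ∀ (input_arr : List Int), Dom_get_number_of_speech_events input_arr → Pre_get_number_of_speech_events input_arr → Spec_get_number_of_speech_events input_arr (get_number_of_speech_events input_arr)

-- ===== LEMMAS AND PROOFS =====
-- Loop invariant: A's in_chunk flag always equals "previous value nonzero"; with that,
-- the loop adds exactly the number of rising edges of prev :: arr.
lemma pvLoopA_eq (arr : List Int) : ∀ (c prev : Int),
    pvLoopA arr c (decide (prev ≠ 0)) =
      c + Int.ofNat (((prev :: arr).zip arr).countP (fun p => decide (p.2 ≠ 0 ∧ p.1 = 0))) := by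
  induction arr with
  | nil => intro c prev; simp [pvLoopA]
  | cons v rest ih =>
    intro c prev
    by_cases hv : v = 0
    · subst hv
      have h0 := ih c 0
      simp only [ne_eq, not_true_eq_false, decide_false] at h0
      by_cases hp : prev = 0 <;>
        simp [pvLoopA, hp, List.zip_cons_cons, List.countP_cons, h0]
    · by_cases hp : prev = 0
      · have h1 := ih (c + 1) v
        simp only [ne_eq, hv, not_false_eq_true, decide_true] at h1
        simp [pvLoopA, hv, hp, List.zip_cons_cons, List.countP_cons, h1]
        ring
      · have h1 := ih c v
        simp only [ne_eq, hv, not_false_eq_true, decide_true] at h1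
        simp [pvLoopA, hv, hp, List.zip_cons_cons, List.countP_cons, h1]

-- ===== VERDICT (by name: the statement is the Claim_ definition above) =====
theorem get_number_of_speech_events_spec : Claim_equal_get_number_of_speech_events := by
  intro arr _ hpre
  unfold Spec_get_number_of_speech_events get_number_of_speech_events get_number_of_speech_events_alt
  rw [if_neg hpre]
  have h := pvLoopA_eq arr 0 0
  simpa using h
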